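-- pv_equiv track=rewrite | github.com/aubreyrees/pluggable-list | tests/conftest.py | access_seq_iter
-- ===== SOURCE A (Python) =====
-- def access_seq_iter(access_seq, shifting=False):
--     if shifting:
--         removed = set()
--         for access_idx in access_seq:
--             yield access_idx - sum(1 for x in removed if x < access_idx)
--             removed.add(access_idx)
--     else:
--         for access_idx in access_seq:
--             yield access_idx
-- ===== SOURCE B (Python) =====
-- def _shifted(access_seq):
--     seen = []  # sorted, distinct values already yielded
--     for v in access_seq:
--         lo = 0
--         hi = len(seen)
--         while lo < hi:
--             mid = (lo + hi) // 2
--             if seen[mid] < v: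
--                 lo = mid + 1
--             else:
--                 hi = mid
--         yield v - lo
--         if lo == len(seen) or seen[lo] != v:
--             seen.insert(lo, v)
--
--
-- def access_seq_iter(access_seq, shifting=False):
--     if shifting:
--         return _shifted(access_seq)
--     return list(access_seq)
-- ===== Notes on version B (the rewrite author's own statement) =====
-- stated objective: alternative
-- what changed: A counts prior smaller removed values by a linear scan over the whole removed set at every step; B keeps the seen values as a sorted distinct list and gets the count with an inlined binary search (bisect_left), inserting each new value at its sorted position.
import Mathlib
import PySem

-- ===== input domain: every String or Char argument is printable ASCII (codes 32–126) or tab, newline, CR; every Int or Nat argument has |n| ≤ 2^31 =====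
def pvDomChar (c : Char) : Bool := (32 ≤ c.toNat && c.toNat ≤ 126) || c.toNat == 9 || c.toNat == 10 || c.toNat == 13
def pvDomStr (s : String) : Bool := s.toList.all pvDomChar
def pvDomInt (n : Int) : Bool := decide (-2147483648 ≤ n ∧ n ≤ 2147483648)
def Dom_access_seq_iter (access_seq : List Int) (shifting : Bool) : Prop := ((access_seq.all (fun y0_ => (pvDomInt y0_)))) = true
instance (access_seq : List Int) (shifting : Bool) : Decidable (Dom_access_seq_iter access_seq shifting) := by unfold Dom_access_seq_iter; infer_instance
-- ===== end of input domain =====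

-- B replaces A's per-element linear count over the set of removed values by a sorted
-- distinct list with a hand-written binary search (objective: replace the inner scan).
-- Both versions are Python generators; the equivalence is about list(...) of the yields.

-- ===== PORT A =====
-- state: (removed set, yielded output); 'sum(1 for x in removed if x < v)' is the
-- length of the filter over the set's elements (order-independent, so exact).
def access_seq_iter (access_seq : List Int) (shifting : Bool) : List Int :=
  if shifting then
    (access_seq.foldl
      (fun (st : PySem.Set Int × List Int) v =>
        (PySem.Set.add st.1 v,
         st.2 ++ [v - ((st.1.filter (fun x => x < v)).length : Int)]))
      (PySem.Set.empty, [])).2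
  else
    access_seq

-- ===== PORT B =====
-- B's inlined binary-search while loop, recursion on hi - lo; seen[mid] is always in range,
-- so the total getD stands in for the list indexing.
def bisectLeft (a : List Int) (x : Int) (lo hi : Nat) : Nat :=
  if _h : lo < hi then
    let mid := (lo + hi) / 2
    if a.getD mid 0 < x then bisectLeft a x (mid + 1) hi
    else bisectLeft a x lo mid
  else lo
termination_by hi - lo
decreasing_by all_goals omega

def access_seq_iter_alt (access_seq : List Int) (shifting : Bool) : List Int :=
  if shifting then
    (access_seq.foldl
      (fun (st : List Int × List Int) v =>
        let seen := st.1
        let pos := bisectLeft seen v 0 seen.length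
        let out := st.2 ++ [v - (pos : Int)]
        if pos = seen.length ∨ seen.getD pos 0 ≠ v then
          (seen.insertIdx pos v, out)
        else (seen, out))
      ([], [])).2
  else
    access_seq

-- ===== PRECONDITION & SPEC =====
def Spec_access_seq_iter (access_seq : List Int) (shifting : Bool) (out : List Int) : Prop := out = access_seq_iter_alt access_seq shifting
instance (access_seq : List Int) (shifting : Bool) (out : List Int) : Decidable (Spec_access_seq_iter access_seq shifting out) := by unfold Spec_access_seq_iter; infer_instance

-- ===== CLAIM (what is proved, stated in full; the proofs are below) =====
def Claim_equal_access_seq_iter : Prop := ∀ (access_seq : List Int) (shifting : Bool), Dom_access_seq_iter access_seq shifting → Spec_access_seq_iter access_seq shifting (access_seq_iter access_seq shifting)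

-- ===== LEMMAS AND PROOFS =====

-- In a strictly sorted list the elements < x are exactly those at indices < countP (· < x).
theorem sorted_lt_iff_lt_countP (a : List Int) (x : Int) (hs : a.Pairwise (· < ·)) :
    ∀ i, (hi : i < a.length) → (a[i] < x ↔ i < a.countP (fun y => decide (y < x))) := by
  induction a with
  | nil => intro i hi; simp at hi
  | cons h t ih =>
    rcases List.pairwise_cons.mp hs with ⟨hht, hts⟩
    intro i hi
    by_cases hx : h < x
    · have hcons : (h :: t).countP (fun y => decide (y < x))
          = t.countP (fun y => decide (y < x)) + 1 := by
        simp [hx]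
      cases i with
      | zero => rw [hcons]; simpa using hx
      | succ j =>
        have hj : j < t.length := by simpa using hi
        have hcj := ih hts j hj
        simp only [List.getElem_cons_succ, hcons]
        rw [hcj]; omega
    · have hz : t.countP (fun y => decide (y < x)) = 0 := by
        apply List.countP_eq_zero.mpr
        intro y hy
        have := hht y hy
        simp only [decide_eq_true_eq]
        omega
      have hcons : (h :: t).countP (fun y => decide (y < x)) = 0 := by
        simp [hx, hz]
      cases i with
      | zero => rw [hcons]; simpa using hx
      | succ j =>
        have hj : j < t.length := by simpa using hi
        have hty : ¬ t[j] < x := by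
          have := hht t[j] (List.getElem_mem hj)
          omega
        simp [hcons, hty]

-- bisectLeft computes countP (· < x) on a strictly sorted list.
theorem bisectLeft_spec (a : List Int) (x : Int) (hs : a.Pairwise (· < ·)) :
    ∀ lo hi, lo ≤ hi → hi ≤ a.length →
      (∀ i, i < lo → (hi2 : i < a.length) → a[i] < x) →
      (∀ i, hi ≤ i → (hi2 : i < a.length) → ¬ a[i] < x) →
      bisectLeft a x lo hi = a.countP (fun y => decide (y < x)) := by
  intro lo hi
  induction lo, hi using bisectLeft.induct a x with
  | case1 lo hi hlt mid hmidlt ih =>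
    intro hle hhi hlo hhiP
    have hmid : mid < a.length := by
      have : mid < hi := by simp only [mid]; omega
      omega
    have hmval : a.getD mid 0 = a[mid] := List.getD_eq_getElem a 0 hmid
    rw [bisectLeft, dif_pos hlt, show (lo + hi) / 2 = mid from rfl, if_pos hmidlt]
    apply ih (by simp only [mid]; omega) hhi
    · intro i hi1 hi2
      have hmx : a[mid] < x := by rwa [hmval] at hmidlt
      rcases Nat.lt_succ_iff_lt_or_eq.mp hi1 with h | h
      · calc a[i] < a[mid] := List.pairwise_iff_getElem.mp hs i mid hi2 hmid h
             _ < x := hmx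
      · subst h; exact hmx
    · exact hhiP
  | case2 lo hi hlt mid hmidge ih =>
    intro hle hhi hlo hhiP
    have hmid : mid < a.length := by
      have : mid < hi := by simp only [mid]; omega
      omega
    have hmval : a.getD mid 0 = a[mid] := List.getD_eq_getElem a 0 hmid
    rw [bisectLeft, dif_pos hlt, show (lo + hi) / 2 = mid from rfl, if_neg hmidge]
    apply ih (by simp only [mid]; omega) (by omega) hlo
    · intro i hi1 hi2
      have hmx : ¬ a[mid] < x := by rwa [hmval] at hmidge
      rcases Nat.eq_or_lt_of_le hi1 with h | h
      · simpa only [← h] using hmx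
      · have := List.pairwise_iff_getElem.mp hs mid i hmid hi2 h
        omega
  | case3 lo hi hnlt =>
    intro hle hhi hlo hhiP
    have hlohi : lo = hi := by omega
    subst hlohi
    rw [bisectLeft, dif_neg hnlt]
    have hcle : a.countP (fun y => decide (y < x)) ≤ a.length := List.countP_le_length
    by_contra hne
    rcases Nat.lt_or_ge lo (a.countP (fun y => decide (y < x))) with h | h
    · have hll : lo < a.length := by omega
      have := (sorted_lt_iff_lt_countP a x hs lo hll).mpr h
      exact hhiP lo (le_refl _) hll this
    · have hcl : a.countP (fun y => decide (y < x)) < lo := by omega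
      have hcll : a.countP (fun y => decide (y < x)) < a.length := by omega
      have := (sorted_lt_iff_lt_countP a x hs _ hcll).mp (hlo _ hcl hcll)
      omega

-- Counting smaller elements agrees between the set's list (A) and the sorted list (B).
theorem count_eq_of_perm (r s : List Int) (hp : r.Perm s) (v : Int) :
    (r.filter (fun x => x < v)).length = s.countP (fun y => decide (y < v)) := by
  rw [← List.countP_eq_length_filter]
  exact hp.countP_eq _

theorem myInsertIdx_eq (x : Int) : ∀ (i : Nat) (l : List Int), i ≤ l.length →
    l.insertIdx i x = l.take i ++ x :: l.drop i := by
  intro i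
  induction i with
  | zero => intro l _; simp
  | succ j ih =>
    intro l hl
    cases l with
    | nil => simp at hl
    | cons h t => simp [List.insertIdx_succ_cons, ih t (by simpa using hl)]

-- The loop invariant: A's set is a permutation of B's sorted distinct list.
theorem fold_eq (l : List Int) :
    ∀ (r : PySem.Set Int) (s out : List Int), r.Perm s → s.Pairwise (· < ·) →
    (l.foldl
      (fun (st : PySem.Set Int × List Int) v =>
        (PySem.Set.add st.1 v,
         st.2 ++ [v - ((st.1.filter (fun x => x < v)).length : Int)]))
      (r, out)).2
    = (l.foldl
      (fun (st : List Int × List Int) v =>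
        let seen := st.1
        let pos := bisectLeft seen v 0 seen.length
        let out := st.2 ++ [v - (pos : Int)]
        if pos = seen.length ∨ seen.getD pos 0 ≠ v then
          (seen.insertIdx pos v, out)
        else (seen, out))
      (s, out)).2 := by
  induction l with
  | nil => intro r s out _ _; rfl
  | cons v t ih =>
    intro r s out hperm hsort
    simp only [List.foldl_cons]
    have hpos : bisectLeft s v 0 s.length = s.countP (fun y => decide (y < v)) := by
      apply bisectLeft_spec s v hsort 0 s.length (Nat.zero_le _) (le_refl _)
      · intro i hi _; omega
      · intro i hi hi2; omega
    have hcle : s.countP (fun y => decide (y < v)) ≤ s.length := List.countP_le_length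
    have hchar := sorted_lt_iff_lt_countP s v hsort
    have hcntA : ((r.filter (fun x => x < v)).length : Int)
        = ((s.countP (fun y => decide (y < v)) : Nat) : Int) := by
      exact_mod_cast count_eq_of_perm r s hperm v
    rw [hpos, hcntA]
    by_cases hmem : v ∈ s
    · -- v already seen: A's set add is a no-op, B does not insert.
      have hradd : PySem.Set.add r v = r := by
        have hmemr : v ∈ r := hperm.mem_iff.mpr hmem
        simp [PySem.Set.add, hmemr]
      obtain ⟨i, hi, hiv⟩ := List.mem_iff_getElem.mp hmem
      have hile : ¬ i < s.countP (fun y => decide (y < v)) := by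
        intro hlt
        have := (hchar i hi).mpr hlt
        rw [hiv] at this
        exact lt_irrefl v this
      have hclt : s.countP (fun y => decide (y < v)) < s.length := by omega
      have hsc : s[s.countP (fun y => decide (y < v))]'hclt = v := by
        have h1 : ¬ s[s.countP (fun y => decide (y < v))]'hclt < v := by
          intro hlt
          exact lt_irrefl _ ((hchar _ hclt).mp hlt)
        have h2 : ¬ s.countP (fun y => decide (y < v)) < i := by
          intro hlt
          have := List.pairwise_iff_getElem.mp hsort _ i hclt hi hlt
          rw [hiv] at this
          omega
        have hci : s.countP (fun y => decide (y < v)) = i := by omega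
        subst hci
        exact hiv
      have hcond : ¬ (s.countP (fun y => decide (y < v)) = s.length
          ∨ s.getD (s.countP (fun y => decide (y < v))) 0 ≠ v) := by
        intro hor
        rcases hor with h | h
        · omega
        · exact h (by rw [List.getD_eq_getElem s 0 hclt]; exact hsc)
      rw [if_neg hcond, hradd]
      exact ih r s _ hperm hsort
    · -- v new: A appends it to the set's list, B inserts it at its sorted position.
      have hradd : PySem.Set.add r v = r ++ [v] := by
        have hmemr : v ∉ r := fun h => hmem (hperm.mem_iff.mp h)
        simp [PySem.Set.add, hmemr]
      have hcond : s.countP (fun y => decide (y < v)) = s.length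
          ∨ s.getD (s.countP (fun y => decide (y < v))) 0 ≠ v := by
        rcases Nat.eq_or_lt_of_le hcle with h | h
        · exact Or.inl h
        · refine Or.inr ?_
          rw [List.getD_eq_getElem s 0 h]
          intro hv
          exact hmem (hv ▸ List.getElem_mem h)
      rw [if_pos hcond, hradd]
      have hperm' : (r ++ [v]).Perm (s.insertIdx (s.countP (fun y => decide (y < v))) v) := by
        have p1 : (r ++ [v]).Perm (v :: r) := List.perm_append_comm
        have p2 : (v :: r).Perm (v :: s) := hperm.cons v
        have p3 : (s.insertIdx (s.countP (fun y => decide (y < v))) v).Perm (v :: s) :=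
          List.perm_insertIdx v s hcle
        exact (p1.trans p2).trans p3.symm
      have hsort' : (s.insertIdx (s.countP (fun y => decide (y < v))) v).Pairwise (· < ·) := by
        rw [myInsertIdx_eq v _ s hcle]
        have htake : ∀ y ∈ s.take (s.countP (fun y => decide (y < v))), y < v := by
          intro y hy
          obtain ⟨i, hilen, hiv⟩ := List.mem_iff_getElem.mp hy
          have hic : i < s.countP (fun y => decide (y < v)) := by
            have := hilen
            simp [List.length_take] at this
            omega
          have hil : i < s.length := by omega
          have : (s.take (s.countP (fun y => decide (y < v))))[i]'hilen = s[i]'hil :=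
            List.getElem_take
          rw [this] at hiv
          rw [← hiv]
          exact (hchar i hil).mpr hic
        have hdrop : ∀ y ∈ s.drop (s.countP (fun y => decide (y < v))), v < y := by
          intro y hy
          obtain ⟨i, hilen, hiv⟩ := List.mem_iff_getElem.mp hy
          have hil : s.countP (fun y => decide (y < v)) + i < s.length := by
            have := hilen
            simp [List.length_drop] at this
            omega
          have heq : (s.drop (s.countP (fun y => decide (y < v))))[i]'hilen
              = s[s.countP (fun y => decide (y < v)) + i]'hil := List.getElem_drop
          rw [heq] at hiv
          have hnlt : ¬ s[s.countP (fun y => decide (y < v)) + i]'hil < v := by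
            intro hlt
            have := (hchar _ hil).mp hlt
            omega
          have hne : s[s.countP (fun y => decide (y < v)) + i]'hil ≠ v := by
            intro h
            exact hmem (h ▸ List.getElem_mem hil)
          rw [hiv] at hnlt hne
          omega
        rw [List.pairwise_append]
        refine ⟨List.Pairwise.sublist (List.take_sublist _ s) hsort, ?_, ?_⟩
        · rw [List.pairwise_cons]
          exact ⟨hdrop, List.Pairwise.sublist (List.drop_sublist _ s) hsort⟩
        · intro x hx y hy
          have hxv := htake x hx
          rcases List.mem_cons.mp hy with h | h
          · rw [h]; exact hxv
          · have := hdrop y h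
            omega
      exact ih (r ++ [v]) _ _ hperm' hsort'

-- ===== VERDICT (by name: the statement is the Claim_ definition above) =====
theorem access_seq_iter_spec : Claim_equal_access_seq_iter := by
  intro access_seq shifting _
  unfold Spec_access_seq_iter access_seq_iter access_seq_iter_alt
  cases shifting with
  | false => simp
  | true =>
    rw [if_pos rfl, if_pos rfl]
    exact fold_eq access_seq PySem.Set.empty [] [] (by simp [PySem.Set.empty]) (by simp)
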